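-- pv_equiv track=rewrite | github.com/blas1n/Algorithm | HackerRank/algorithm/Longest_Arithmetic_Subsequence_with_Given_Difference.py | findLongestArithmeticProgression
-- ===== SOURCE A (Python) =====
-- def findLongestArithmeticProgression(arr, k):
--     n_map =  {n:0 for n in arr}
--     answer = 0
--     for n in sorted(n_map):
--         if n not in n_map:
--             continue
--         val = n_map[n - k] + 1 if n - k in n_map else 1
--         n_map[n] = val
--         answer = max(val, answer)
--     return answer
-- ===== SOURCE B (Python) =====
-- def findLongestArithmeticProgression(arr, k):
--     if not arr:
--         return 0
--     if k <= 0: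
--         # A's ascending scan never finds a previously-computed n-k for k<=0, so every chain has length 1
--         return 1
--     s = set(arr)
--     best = 0
--     for n in s:
--         if n - k in s:
--             continue  # n is not the start of a chain
--         length = 0
--         m = n
--         while m in s:
--             length += 1
--             m += k
--         best = max(best, length)
--     return best
-- ===== Notes on version B (the rewrite author's own statement) =====
-- stated objective: faster
-- what changed: Replaces A's sort of the distinct values followed by an in-order DP over a dict with a hash-set chain walk: B walks each arithmetic chain once upward from its start (value with value-k absent), with direct answers for empty input and k<=0; no sorting.
import Mathlib
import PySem

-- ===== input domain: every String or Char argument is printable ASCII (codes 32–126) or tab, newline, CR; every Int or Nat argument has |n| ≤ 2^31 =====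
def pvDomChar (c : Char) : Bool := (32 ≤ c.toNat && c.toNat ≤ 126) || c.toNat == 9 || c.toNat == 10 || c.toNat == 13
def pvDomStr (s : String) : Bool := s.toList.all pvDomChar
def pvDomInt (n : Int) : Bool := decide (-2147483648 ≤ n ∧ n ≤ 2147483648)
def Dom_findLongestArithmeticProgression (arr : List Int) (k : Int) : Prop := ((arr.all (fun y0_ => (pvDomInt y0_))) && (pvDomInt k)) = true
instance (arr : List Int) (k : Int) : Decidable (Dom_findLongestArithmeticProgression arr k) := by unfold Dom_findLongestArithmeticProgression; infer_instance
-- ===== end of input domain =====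

-- B replaces A's sort-then-DP over the sorted distinct values by a hash-set chain walk
-- from each chain start (with direct answers for empty input and k ≤ 0): objective = faster (no sort).

-- ===== PORT A =====
def findLongestArithmeticProgression (arr : List Int) (k : Int) : Int :=
  -- n_map = {n: 0 for n in arr}
  let nmap := arr.foldl (fun d n => d.insert n 0) (PySem.Dict.empty : PySem.Dict Int Int)
  -- for n in sorted(n_map): …
  let res := (PySem.List.sorted nmap.keys (fun x => x) false).foldl
    (fun (st : PySem.Dict Int Int × Int) n =>
      if st.1.contains n = false then st          -- if n not in n_map: continue
      else
        let val := if st.1.contains (n - k) then st.1.getD (n - k) 0 + 1 else 1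
        (st.1.insert n val, max val st.2))        -- n_map[n] = val; answer = max(val, answer)
    (nmap, 0)
  res.2

-- ===== PORT B =====
-- the while loop of Source B; fuel: for k > 0 the walk visits strictly increasing distinct
-- members of the set s, so s.length + 1 fuel is never exhausted (proved below)
def pvWalk (s : PySem.Set Int) (k : Int) : Nat → Int → Int → Int
  | 0, _, length => length
  | f + 1, m, length => if PySem.Set.contains s m then pvWalk s k f (m + k) (length + 1) else length

def findLongestArithmeticProgression_alt (arr : List Int) (k : Int) : Int :=
  if arr = [] then 0
  else if k ≤ 0 then 1
  else
    let s := PySem.Set.ofList arr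
    s.foldl (fun best n =>
      if PySem.Set.contains s (n - k) then best   -- n is not a chain start: continue
      else max best (pvWalk s k (s.length + 1) n 0)) 0

-- ===== PRECONDITION & SPEC =====
def Spec_findLongestArithmeticProgression (arr : List Int) (k : Int) (out : Int) : Prop := out = findLongestArithmeticProgression_alt arr k
instance (arr : List Int) (k : Int) (out : Int) : Decidable (Spec_findLongestArithmeticProgression arr k out) := by unfold Spec_findLongestArithmeticProgression; infer_instance

-- ===== CLAIM (what is proved, stated in full; the proofs are below) =====
def Claim_equal_findLongestArithmeticProgression : Prop := ∀ (arr : List Int) (k : Int), Dom_findLongestArithmeticProgression arr k → Spec_findLongestArithmeticProgression arr k (findLongestArithmeticProgression arr k)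

-- ===== LEMMAS AND PROOFS =====

-- chain length downward from n (not counting how far n itself is in s): what A's DP stores at n
def pvDown (s : List Int) (k : Int) : Nat → Int → Int
  | 0, _ => 1
  | f + 1, n => if (n - k) ∈ s then pvDown s k f (n - k) + 1 else 1

-- chain length upward from n: what Source B's while loop counts
def pvUp (s : List Int) (k : Int) : Nat → Int → Int
  | 0, _ => 0
  | f + 1, n => if n ∈ s then pvUp s k f (n + k) + 1 else 0

lemma pvDown_pos (s : List Int) (k : Int) : ∀ (f : Nat) (n : Int), 1 ≤ pvDown s k f n := by
  intro f n
  cases f with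
  | zero => simp [pvDown]
  | succ f =>
    simp only [pvDown]
    split_ifs with h
    · have := pvDown_pos s k f (n - k); omega
    · omega

lemma pvUp_nonneg (s : List Int) (k : Int) : ∀ (f : Nat) (n : Int), 0 ≤ pvUp s k f n := by
  intro f n
  induction f generalizing n with
  | zero => simp [pvUp]
  | succ f ih =>
    simp only [pvUp]
    split_ifs with h
    · have := ih (n + k); omega
    · omega

-- strict countP comparison (the measure-decrease engine)
lemma pvCountP_lt {p q : Int → Bool} (l : List Int)
    (himp : ∀ a ∈ l, p a = true → q a = true) (x : Int) (hx : x ∈ l)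
    (hpx : p x = false) (hqx : q x = true) : l.countP p < l.countP q := by
  induction l with
  | nil => simp at hx
  | cons a l ih =>
    rcases List.mem_cons.mp hx with rfl | hxl
    · have hmono : l.countP p ≤ l.countP q :=
        List.countP_mono_left (fun a ha hpa => himp a (List.mem_cons_of_mem _ ha) hpa)
      simp [hpx, hqx]; omega
    · have hlt := ih (fun a ha hpa => himp a (List.mem_cons_of_mem _ ha) hpa) hxl
      have hhead : (if p a then 1 else 0) ≤ (if q a then 1 else 0) := by
        split_ifs with h1 h2
        · omega
        · exact absurd (himp a List.mem_cons_self h1) (by simp [h2])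
        · omega
        · omega
      simp [List.countP_cons]; omega

-- measure for the downward walk
def pvDB (s : List Int) (n : Int) : Nat := s.countP (fun m => decide (m < n))
-- measure for the upward walk
def pvUB (s : List Int) (n : Int) : Nat := s.countP (fun m => decide (n ≤ m))

lemma pvDB_lt_length (s : List Int) (n : Int) (h : n ∈ s) : pvDB s n < s.length := by
  have := List.countP_eq_length (l := s) (p := fun m => decide (m < n))
  have hle := List.countP_le_length (l := s) (p := fun m => decide (m < n))
  unfold pvDB
  rcases Nat.lt_or_ge (s.countP (fun m => decide (m < n))) s.length with h1 | h1
  · exact h1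
  · exfalso
    have heq : s.countP (fun m => decide (m < n)) = s.length := le_antisymm hle h1
    have := this.mp heq n h
    simp at this

lemma pvDB_step (s : List Int) (k : Int) (hk : 0 < k) (n : Int) (h : (n - k) ∈ s) :
    pvDB s (n - k) < pvDB s n := by
  unfold pvDB
  refine pvCountP_lt s ?_ (n - k) h ?_ ?_
  · intro a _ ha; simp at ha ⊢; omega
  · simp
  · simp; omega

lemma pvUB_step (s : List Int) (k : Int) (hk : 0 < k) (n : Int) (h : n ∈ s) :
    pvUB s (n + k) < pvUB s n := by
  unfold pvUB
  refine pvCountP_lt s ?_ n h ?_ ?_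
  · intro a _ ha; simp at ha ⊢; omega
  · simp; omega
  · simp

lemma pvDown_stab (s : List Int) (k : Int) (hk : 0 < k) :
    ∀ (f g : Nat) (n : Int), pvDB s n < f → pvDB s n < g →
      pvDown s k f n = pvDown s k g n := by
  intro f
  induction f with
  | zero => omega
  | succ f ih =>
    intro g n hf hg
    cases g with
    | zero => omega
    | succ g =>
      simp only [pvDown]
      split_ifs with h
      · have hm := pvDB_step s k hk n h
        rw [ih g (n - k) (by omega) (by omega)]
      · rfl

-- what A's DP value at n says about s: chain membership below n and the first gap
lemma pvDown_char (s : List Int) (k : Int) (hk : 0 < k) :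
    ∀ (f : Nat) (n : Int), pvDB s n < f →
      (∀ i : Int, 1 ≤ i → i < pvDown s k f n → n - i * k ∈ s) ∧
      (n - (pvDown s k f n) * k ∉ s) := by
  intro f
  induction f with
  | zero => omega
  | succ f ih =>
    intro n hf
    simp only [pvDown]
    split_ifs with h
    · have hm := pvDB_step s k hk n h
      obtain ⟨h1, h2⟩ := ih (n - k) (by omega)
      constructor
      · intro i hi1 hi2
        rcases eq_or_lt_of_le hi1 with rfl | hi
        · simpa using h
        · have := h1 (i - 1) (by omega) (by omega)
          rw [show n - k - (i - 1) * k = n - i * k by ring] at this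
          exact this
      · have := h2
        rw [show n - k - pvDown s k f (n - k) * k = n - (pvDown s k f (n - k) + 1) * k by ring] at this
        exact this
    · constructor
      · intro i hi1 hi2; omega
      · simpa using h

lemma pvUp_char (s : List Int) (k : Int) (hk : 0 < k) :
    ∀ (f : Nat) (n : Int), pvUB s n < f →
      (∀ i : Int, 0 ≤ i → i < pvUp s k f n → n + i * k ∈ s) ∧
      (n + (pvUp s k f n) * k ∉ s) := by
  intro f
  induction f with
  | zero => omega
  | succ f ih =>
    intro n hf
    simp only [pvUp]
    split_ifs with h
    · have hm := pvUB_step s k hk n h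
      obtain ⟨h1, h2⟩ := ih (n + k) (by omega)
      constructor
      · intro i hi1 hi2
        rcases eq_or_lt_of_le hi1 with rfl | hi
        · simpa using h
        · have := h1 (i - 1) (by omega) (by omega)
          rw [show n + k + (i - 1) * k = n + i * k by ring] at this
          exact this
      · have := h2
        rw [show n + k + pvUp s k f (n + k) * k = n + (pvUp s k f (n + k) + 1) * k by ring] at this
        exact this
    · constructor
      · intro i hi1 hi2; omega
      · simpa using h

-- lower bound for pvDown from a downward-membership segment
lemma pvDown_lb (s : List Int) (k : Int) (hk : 0 < k) :
    ∀ (f : Nat) (n : Int) (c : Int), pvDB s n < f →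
      (∀ i : Int, 1 ≤ i → i < c → n - i * k ∈ s) → c ≤ pvDown s k f n := by
  intro f
  induction f with
  | zero => omega
  | succ f ih =>
    intro n c hf hmem
    by_cases hc : c ≤ 1
    · have := pvDown_pos s k (f + 1) n; omega
    · have h1 : (n - k) ∈ s := by simpa using hmem 1 (by omega) (by omega)
      have hm := pvDB_step s k hk n h1
      have := ih (n - k) (c - 1) (by omega) (by
        intro i hi1 hi2
        have := hmem (i + 1) (by omega) (by omega)
        rw [show n - (i + 1) * k = n - k - i * k by ring] at this
        exact this)
      simp only [pvDown, h1, if_pos]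
      omega

-- lower bound for pvUp from an upward-membership segment
lemma pvUp_lb (s : List Int) (k : Int) (hk : 0 < k) :
    ∀ (f : Nat) (n : Int) (c : Int), pvUB s n < f → 0 < c →
      (∀ i : Int, 0 ≤ i → i < c → n + i * k ∈ s) → c ≤ pvUp s k f n := by
  intro f
  induction f with
  | zero => omega
  | succ f ih =>
    intro n c hf hc hmem
    have h0 : n ∈ s := by simpa using hmem 0 (by omega) hc
    have hm := pvUB_step s k hk n h0
    simp only [pvUp, h0, if_pos]
    by_cases hc1 : c ≤ 1
    · have := pvUp_nonneg s k f (n + k); omega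
    · have := ih (n + k) (c - 1) (by omega) (by omega) (by
        intro i hi1 hi2
        have := hmem (i + 1) (by omega) (by omega)
        rw [show n + (i + 1) * k = n + k + i * k by ring] at this
        exact this)
      omega

-- max-fold toolbox
lemma pvFoldMax_init_le (g : Int → Int) : ∀ (l : List Int) (a : Int),
    a ≤ l.foldl (fun a y => max a (g y)) a := by
  intro l
  induction l with
  | nil => simp
  | cons x l ih =>
    intro a
    have := ih (max a (g x))
    simp only [List.foldl_cons]
    omega

lemma pvFoldMax_mem_le (g : Int → Int) : ∀ (l : List Int) (a x : Int), x ∈ l →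
    g x ≤ l.foldl (fun a y => max a (g y)) a := by
  intro l
  induction l with
  | nil => simp
  | cons z l ih =>
    intro a x hx
    rcases List.mem_cons.mp hx with rfl | hxl
    · have := pvFoldMax_init_le g l (max a (g x))
      simp only [List.foldl_cons]
      omega
    · simpa using ih (max a (g z)) x hxl

lemma pvFoldMax_le (g : Int → Int) (r : Int) : ∀ (l : List Int) (a : Int), a ≤ r →
    (∀ x ∈ l, g x ≤ r) → l.foldl (fun a y => max a (g y)) a ≤ r := by
  intro l
  induction l with
  | nil => simp only [List.foldl_nil]; exact fun a h _ => h
  | cons z l ih =>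
    intro a ha hall
    simp only [List.foldl_cons]
    exact ih (max a (g z)) (by have := hall z List.mem_cons_self; omega)
      (fun x hx => hall x (List.mem_cons_of_mem _ hx))

-- A's dict after the comprehension {n: 0 for n in arr}
lemma pvInit_get? : ∀ (arr : List Int) (d : PySem.Dict Int Int) (m : Int),
    (arr.foldl (fun d n => d.insert n 0) d).get? m = if m ∈ arr then some 0 else d.get? m := by
  intro arr
  induction arr with
  | nil => simp
  | cons a arr ih =>
    intro d m
    simp only [List.foldl_cons]
    rw [ih]
    by_cases hm : m ∈ arr
    · simp [hm]
    · by_cases hma : m = a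
      · subst hma; simp [hm]
      · simp [hm, hma, PySem.Dict.get?_insert]

-- A's loop, k > 0 case: the answer accumulates max over pvDown
lemma pvALoop_pos (arr : List Int) (k : Int) (hk : 0 < k) :
    ∀ (r p : List Int) (d : PySem.Dict Int Int) (ans : Int),
      PySem.List.sorted (PySem.Set.ofList arr) (fun x => x) false = p ++ r →
      (∀ m : Int, d.get? m =
        if m ∈ PySem.Set.ofList arr then
          some (if m ∈ p then pvDown (PySem.Set.ofList arr) k ((PySem.Set.ofList arr).length + 1) m else 0)
        else none) →
      (r.foldl
        (fun (st : PySem.Dict Int Int × Int) n =>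
          if st.1.contains n = false then st
          else
            let val := if st.1.contains (n - k) then st.1.getD (n - k) 0 + 1 else 1
            (st.1.insert n val, max val st.2))
        (d, ans)).2
      = r.foldl (fun a y => max a (pvDown (PySem.Set.ofList arr) k ((PySem.Set.ofList arr).length + 1) y)) ans := by
  intro r
  induction r with
  | nil => intro p d ans _ _; rfl
  | cons n r ih =>
    intro p d ans hsplit hinv
    have hpair := PySem.List.sorted_ofList_pairwise_lt (κ := Int) arr
    have hnks : n ∈ PySem.List.sorted (PySem.Set.ofList arr) (fun x => x) false := by
      rw [hsplit]; exact List.mem_append_right p List.mem_cons_self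
    have hnS : n ∈ PySem.Set.ofList arr := (PySem.List.mem_sorted _ _ _ n).mp hnks
    have hcont : d.contains n = true := by
      rw [PySem.Dict.contains_eq_isSome_get?, hinv n]; simp [hnS]
    have hval : (if d.contains (n - k) = true then d.getD (n - k) 0 + 1 else 1)
        = pvDown (PySem.Set.ofList arr) k ((PySem.Set.ofList arr).length + 1) n := by
      by_cases hnk : (n - k) ∈ PySem.Set.ofList arr
      · have hnkp : (n - k) ∈ p := by
          have hnkks : (n - k) ∈ p ++ n :: r := by
            rw [← hsplit]; exact (PySem.List.mem_sorted _ _ _ _).mpr hnk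
          rcases List.mem_append.mp hnkks with h | h
          · exact h
          · exfalso
            rw [hsplit, List.pairwise_append] at hpair
            rcases List.mem_cons.mp h with h' | h'
            · omega
            · have := (List.pairwise_cons.mp hpair.2.1).1 (n - k) h'
              omega
        rw [if_pos (by rw [PySem.Dict.contains_eq_isSome_get?, hinv (n - k)]; simp [hnk])]
        rw [PySem.Dict.getD_eq_get?_getD, hinv (n - k)]
        simp only [hnk, if_pos, hnkp, Option.getD_some]
        have hstab := pvDown_stab (PySem.Set.ofList arr) k hk ((PySem.Set.ofList arr).length)
          ((PySem.Set.ofList arr).length + 1) (n - k)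
          (pvDB_lt_length _ _ hnk) (by have := pvDB_lt_length (PySem.Set.ofList arr) (n - k) hnk; omega)
        rw [show pvDown (PySem.Set.ofList arr) k ((PySem.Set.ofList arr).length + 1) n
            = if (n - k) ∈ PySem.Set.ofList arr then
                pvDown (PySem.Set.ofList arr) k ((PySem.Set.ofList arr).length) (n - k) + 1
              else 1 from rfl]
        rw [if_pos hnk, hstab]
      · rw [if_neg (by rw [PySem.Dict.contains_eq_isSome_get?, hinv (n - k)]; simp [hnk])]
        simp [pvDown, hnk]
    have hsplit' : PySem.List.sorted (PySem.Set.ofList arr) (fun x => x) false = (p ++ [n]) ++ r := by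
      rw [hsplit, List.append_assoc]; rfl
    have hinv' : ∀ m : Int, (d.insert n (pvDown (PySem.Set.ofList arr) k ((PySem.Set.ofList arr).length + 1) n)).get? m =
        if m ∈ PySem.Set.ofList arr then
          some (if m ∈ p ++ [n] then pvDown (PySem.Set.ofList arr) k ((PySem.Set.ofList arr).length + 1) m else 0)
        else none := by
      intro m
      rw [PySem.Dict.get?_insert]
      by_cases hmn : m = n
      · subst hmn; simp [hnS]
      · rw [if_neg hmn, hinv m]
        by_cases hmS : m ∈ PySem.Set.ofList arr
        · simp [hmS, hmn]
        · simp [hmS]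
    simp only [List.foldl_cons, hcont, Bool.true_eq_false, if_false, hval]
    rw [max_comm ans (pvDown (PySem.Set.ofList arr) k ((PySem.Set.ofList arr).length + 1) n)]
    exact ih (p ++ [n]) (d.insert n (pvDown (PySem.Set.ofList arr) k ((PySem.Set.ofList arr).length + 1) n))
      (max (pvDown (PySem.Set.ofList arr) k ((PySem.Set.ofList arr).length + 1) n) ans) hsplit' hinv' 

-- A's loop, k ≤ 0 case: every computed val is 1
lemma pvALoop_nonpos (arr : List Int) (k : Int) (hk : k ≤ 0) :
    ∀ (r p : List Int) (d : PySem.Dict Int Int) (ans : Int),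
      PySem.List.sorted (PySem.Set.ofList arr) (fun x => x) false = p ++ r →
      (∀ m : Int, d.get? m =
        if m ∈ PySem.Set.ofList arr then some (if m ∈ p then (1 : Int) else 0) else none) →
      (r.foldl
        (fun (st : PySem.Dict Int Int × Int) n =>
          if st.1.contains n = false then st
          else
            let val := if st.1.contains (n - k) then st.1.getD (n - k) 0 + 1 else 1
            (st.1.insert n val, max val st.2))
        (d, ans)).2
      = r.foldl (fun a _ => max 1 a) ans := by
  intro r
  induction r with
  | nil => intro p d ans _ _; rfl
  | cons n r ih =>
    intro p d ans hsplit hinv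
    have hpair := PySem.List.sorted_ofList_pairwise_lt (κ := Int) arr
    have hnks : n ∈ PySem.List.sorted (PySem.Set.ofList arr) (fun x => x) false := by
      rw [hsplit]; exact List.mem_append_right p List.mem_cons_self
    have hnS : n ∈ PySem.Set.ofList arr := (PySem.List.mem_sorted _ _ _ n).mp hnks
    have hcont : d.contains n = true := by
      rw [PySem.Dict.contains_eq_isSome_get?, hinv n]; simp [hnS]
    have hplt : ∀ m ∈ p, m < n := by
      rw [hsplit, List.pairwise_append] at hpair
      intro m hm; exact hpair.2.2 m hm n List.mem_cons_self
    have hval : (if d.contains (n - k) = true then d.getD (n - k) 0 + 1 else 1) = 1 := by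
      by_cases hnk : (n - k) ∈ PySem.Set.ofList arr
      · have hnkp : (n - k) ∉ p := fun hnp => by have := hplt _ hnp; omega
        rw [if_pos (by rw [PySem.Dict.contains_eq_isSome_get?, hinv (n - k)]; simp [hnk])]
        rw [PySem.Dict.getD_eq_get?_getD, hinv (n - k)]
        simp [hnk, hnkp]
      · rw [if_neg (by rw [PySem.Dict.contains_eq_isSome_get?, hinv (n - k)]; simp [hnk])]
    have hsplit' : PySem.List.sorted (PySem.Set.ofList arr) (fun x => x) false = (p ++ [n]) ++ r := by
      rw [hsplit, List.append_assoc]; rfl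
    have hinv' : ∀ m : Int, (d.insert n 1).get? m =
        if m ∈ PySem.Set.ofList arr then some (if m ∈ p ++ [n] then (1 : Int) else 0) else none := by
      intro m
      rw [PySem.Dict.get?_insert]
      by_cases hmn : m = n
      · subst hmn; simp [hnS]
      · rw [if_neg hmn, hinv m]
        by_cases hmS : m ∈ PySem.Set.ofList arr
        · simp [hmS, hmn]
        · simp [hmS]
    simp only [List.foldl_cons, hcont, Bool.true_eq_false, if_false, hval]
    exact ih (p ++ [n]) (d.insert n 1) (max 1 ans) hsplit' hinv'


lemma pvFoldOne : ∀ (l : List Int) (a : Int), l ≠ [] →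
    l.foldl (fun a _ => max (1 : Int) a) a = max 1 a := by
  intro l
  induction l with
  | nil => simp
  | cons x l ih =>
    intro a _
    simp only [List.foldl_cons]
    rcases List.eq_nil_or_concat l with rfl | _
    · simp
    · rw [ih (max 1 a) (by rintro rfl; simp_all)]
      omega

lemma pvWalk_eq_up (s : List Int) (k : Int) :
    ∀ (f : Nat) (m len : Int), pvWalk s k f m len = len + pvUp s k f m := by
  intro f
  induction f with
  | zero => intro m len; simp [pvWalk, pvUp]
  | succ f ih =>
    intro m len
    simp only [pvWalk, pvUp, PySem.Set.contains]
    by_cases h : m ∈ s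
    · simp [h, ih]; omega
    · simp [h]

-- B's loop rewritten as a pure max-fold
lemma pvBLoop (s : List Int) (k : Int) (F : Nat) :
    ∀ (l : List Int) (a : Int), 0 ≤ a →
      l.foldl (fun best n =>
        if PySem.Set.contains s (n - k) then best
        else max best (pvWalk s k F n 0)) a
      = l.foldl (fun a y =>
          max a (if (y - k) ∈ s then 0 else pvUp s k F y)) a := by
  have hfun : (fun (best n : Int) => if PySem.Set.contains s (n - k) then best else max best (pvWalk s k F n 0))
      = (fun (best n : Int) => if (n - k) ∈ s then best else max best (pvWalk s k F n 0)) := by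
    funext best n
    simp [PySem.Set.contains]
  intro l
  rw [hfun]
  induction l with
  | nil => simp
  | cons n l ih =>
    intro a ha
    simp only [List.foldl_cons]
    by_cases h : (n - k) ∈ s
    · rw [if_pos h, if_pos h, max_eq_left (by omega : (0:Int) ≤ a)]
      exact ih a ha
    · rw [if_neg h, if_neg h, pvWalk_eq_up, zero_add]
      exact ih (max a (pvUp s k F n)) (by omega)

lemma pvDB_lt_F (s : List Int) (n : Int) : pvDB s n < s.length + 1 :=
  Nat.lt_succ_of_le (List.countP_le_length)

lemma pvUB_lt_F (s : List Int) (n : Int) : pvUB s n < s.length + 1 :=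
  Nat.lt_succ_of_le (List.countP_le_length)

lemma pvUp_pos_of_mem (s : List Int) (k : Int) (f : Nat) (n : Int) (hf : 0 < f) (h : n ∈ s) :
    1 ≤ pvUp s k f n := by
  cases f with
  | zero => omega
  | succ f =>
    simp only [pvUp, h, if_pos]
    have := pvUp_nonneg s k f (n + k)
    omega

-- every DP value of A is attained by B's walk from the bottom of its chain
lemma pvDown_le_B (arr : List Int) (k : Int) (hk : 0 < k) (y : Int)
    (hy : y ∈ PySem.Set.ofList arr) :
    pvDown (PySem.Set.ofList arr) k ((PySem.Set.ofList arr).length + 1) y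
      ≤ (PySem.Set.ofList arr).foldl (fun a z =>
          max a (if (z - k) ∈ PySem.Set.ofList arr then 0
                 else pvUp (PySem.Set.ofList arr) k ((PySem.Set.ofList arr).length + 1) z)) 0 := by
  obtain ⟨hmem, hgap⟩ := pvDown_char (PySem.Set.ofList arr) k hk ((PySem.Set.ofList arr).length + 1) y
    (pvDB_lt_F _ y)
  have hc1 : 1 ≤ pvDown (PySem.Set.ofList arr) k ((PySem.Set.ofList arr).length + 1) y :=
    pvDown_pos _ k _ y
  have hbmem : y - (pvDown (PySem.Set.ofList arr) k ((PySem.Set.ofList arr).length + 1) y - 1) * k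
      ∈ PySem.Set.ofList arr := by
    rcases eq_or_lt_of_le hc1 with h | h
    · rw [show y - (pvDown (PySem.Set.ofList arr) k ((PySem.Set.ofList arr).length + 1) y - 1) * k = y by
        rw [← h]; ring]
      exact hy
    · exact hmem _ (by omega) (by omega)
  have hbstart : (y - (pvDown (PySem.Set.ofList arr) k ((PySem.Set.ofList arr).length + 1) y - 1) * k) - k
      ∉ PySem.Set.ofList arr := by
    rw [show (y - (pvDown (PySem.Set.ofList arr) k ((PySem.Set.ofList arr).length + 1) y - 1) * k) - k
        = y - (pvDown (PySem.Set.ofList arr) k ((PySem.Set.ofList arr).length + 1) y) * k by ring]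
    exact hgap
  have hup : pvDown (PySem.Set.ofList arr) k ((PySem.Set.ofList arr).length + 1) y
      ≤ pvUp (PySem.Set.ofList arr) k ((PySem.Set.ofList arr).length + 1)
          (y - (pvDown (PySem.Set.ofList arr) k ((PySem.Set.ofList arr).length + 1) y - 1) * k) := by
    apply pvUp_lb _ k hk _ _ _ (pvUB_lt_F _ _) (by omega)
    intro i hi0 hic
    by_cases hi : i = pvDown (PySem.Set.ofList arr) k ((PySem.Set.ofList arr).length + 1) y - 1
    · rw [hi, show y - (pvDown (PySem.Set.ofList arr) k ((PySem.Set.ofList arr).length + 1) y - 1) * k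
          + (pvDown (PySem.Set.ofList arr) k ((PySem.Set.ofList arr).length + 1) y - 1) * k = y by ring]
      exact hy
    · have := hmem (pvDown (PySem.Set.ofList arr) k ((PySem.Set.ofList arr).length + 1) y - 1 - i)
        (by omega) (by omega)
      rw [show y - (pvDown (PySem.Set.ofList arr) k ((PySem.Set.ofList arr).length + 1) y - 1) * k + i * k
          = y - (pvDown (PySem.Set.ofList arr) k ((PySem.Set.ofList arr).length + 1) y - 1 - i) * k by ring]
      exact this
  have hfold := pvFoldMax_mem_le (fun z => if (z - k) ∈ PySem.Set.ofList arr then 0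
      else pvUp (PySem.Set.ofList arr) k ((PySem.Set.ofList arr).length + 1) z)
    (PySem.Set.ofList arr) 0 _ hbmem
  simp only [if_neg hbstart] at hfold
  omega

-- every walk of B from a chain start is attained by A's DP value at the top of that chain
lemma pvUpStart_le_A (arr : List Int) (k : Int) (hk : 0 < k) (y : Int)
    (hy : y ∈ PySem.Set.ofList arr) :
    (if (y - k) ∈ PySem.Set.ofList arr then 0
     else pvUp (PySem.Set.ofList arr) k ((PySem.Set.ofList arr).length + 1) y)
      ≤ (PySem.List.sorted (PySem.Set.ofList arr) (fun x => x) false).foldl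
          (fun a z => max a (pvDown (PySem.Set.ofList arr) k ((PySem.Set.ofList arr).length + 1) z)) 0 := by
  by_cases hs : (y - k) ∈ PySem.Set.ofList arr
  · rw [if_pos hs]
    exact pvFoldMax_init_le _ _ 0
  · rw [if_neg hs]
    obtain ⟨hmem, _⟩ := pvUp_char (PySem.Set.ofList arr) k hk ((PySem.Set.ofList arr).length + 1) y
      (pvUB_lt_F _ y)
    have hc1 : 1 ≤ pvUp (PySem.Set.ofList arr) k ((PySem.Set.ofList arr).length + 1) y :=
      pvUp_pos_of_mem _ k _ y (by omega) hy
    have htmem : y + (pvUp (PySem.Set.ofList arr) k ((PySem.Set.ofList arr).length + 1) y - 1) * k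
        ∈ PySem.Set.ofList arr := hmem _ (by omega) (by omega)
    have htks : y + (pvUp (PySem.Set.ofList arr) k ((PySem.Set.ofList arr).length + 1) y - 1) * k
        ∈ PySem.List.sorted (PySem.Set.ofList arr) (fun x => x) false :=
      (PySem.List.mem_sorted _ _ _ _).mpr htmem
    have hdown : pvUp (PySem.Set.ofList arr) k ((PySem.Set.ofList arr).length + 1) y
        ≤ pvDown (PySem.Set.ofList arr) k ((PySem.Set.ofList arr).length + 1)
            (y + (pvUp (PySem.Set.ofList arr) k ((PySem.Set.ofList arr).length + 1) y - 1) * k) := by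
      apply pvDown_lb _ k hk _ _ _ (pvDB_lt_F _ _)
      intro i hi1 hic
      rw [show y + (pvUp (PySem.Set.ofList arr) k ((PySem.Set.ofList arr).length + 1) y - 1) * k - i * k
          = y + (pvUp (PySem.Set.ofList arr) k ((PySem.Set.ofList arr).length + 1) y - 1 - i) * k by ring]
      exact hmem _ (by omega) (by omega)
    exact le_trans hdown (pvFoldMax_mem_le _ _ 0 _ htks)

-- ===== VERDICT (by name: the statement is the Claim_ definition above) =====
theorem findLongestArithmeticProgression_spec : Claim_equal_findLongestArithmeticProgression := by
  intro arr k _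
  unfold Spec_findLongestArithmeticProgression
  have hkeys : (arr.foldl (fun d n => d.insert n (0 : Int)) PySem.Dict.empty).keys
      = PySem.Set.ofList arr := by
    simpa using PySem.Dict.keys_foldl_insert arr (fun _ _ => (0 : Int)) PySem.Dict.empty
  by_cases ha : arr = []
  · subst ha; rfl
  · have e1 : findLongestArithmeticProgression arr k =
        ((PySem.List.sorted (PySem.Set.ofList arr) (fun x => x) false).foldl
          (fun (st : PySem.Dict Int Int × Int) n =>
            if st.1.contains n = false then st
            else
              let val := if st.1.contains (n - k) then st.1.getD (n - k) 0 + 1 else 1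
              (st.1.insert n val, max val st.2))
          (arr.foldl (fun d n => d.insert n 0) PySem.Dict.empty, 0)).2 := by
      rw [← hkeys]; rfl
    by_cases hk : k ≤ 0
    · -- B returns 1; A's every val is 1 and the key list is nonempty
      have hB : findLongestArithmeticProgression_alt arr k = 1 := by
        unfold findLongestArithmeticProgression_alt
        rw [if_neg ha, if_pos hk]
      have hstart : ∀ m : Int,
          (arr.foldl (fun d n => d.insert n (0 : Int)) PySem.Dict.empty).get? m =
          if m ∈ PySem.Set.ofList arr then some (if m ∈ ([] : List Int) then (1 : Int) else 0) else none := by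
        intro m
        rw [pvInit_get?]
        simp [PySem.Set.mem_ofList]
      have hloop := pvALoop_nonpos arr k hk
        (PySem.List.sorted (PySem.Set.ofList arr) (fun x => x) false) []
        (arr.foldl (fun d n => d.insert n 0) PySem.Dict.empty) 0 (by simp) hstart
      have hne : PySem.List.sorted (PySem.Set.ofList arr) (fun x => x) false ≠ [] := by
        intro hnil
        rw [PySem.List.sorted_eq_nil_iff] at hnil
        rcases List.exists_mem_of_ne_nil arr ha with ⟨x, hx⟩
        have : x ∈ PySem.Set.ofList arr := (PySem.Set.mem_ofList arr x).mpr hx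
        rw [hnil] at this
        simp at this
      rw [e1, hB, hloop, pvFoldOne _ 0 hne]
      simp
    · -- k > 0
      have hk' : 0 < k := by omega
      have hstart : ∀ m : Int,
          (arr.foldl (fun d n => d.insert n (0 : Int)) PySem.Dict.empty).get? m =
          if m ∈ PySem.Set.ofList arr then
            some (if m ∈ ([] : List Int) then
              pvDown (PySem.Set.ofList arr) k ((PySem.Set.ofList arr).length + 1) m else 0)
          else none := by
        intro m
        rw [pvInit_get?]
        simp [PySem.Set.mem_ofList]
      have hloop := pvALoop_pos arr k hk'
        (PySem.List.sorted (PySem.Set.ofList arr) (fun x => x) false) []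
        (arr.foldl (fun d n => d.insert n 0) PySem.Dict.empty) 0 (by simp) hstart
      have e2 : findLongestArithmeticProgression_alt arr k =
          (PySem.Set.ofList arr).foldl (fun a y =>
            max a (if (y - k) ∈ PySem.Set.ofList arr then 0
                   else pvUp (PySem.Set.ofList arr) k ((PySem.Set.ofList arr).length + 1) y)) 0 := by
        have e2a : findLongestArithmeticProgression_alt arr k =
            (PySem.Set.ofList arr).foldl (fun best n =>
              if PySem.Set.contains (PySem.Set.ofList arr) (n - k) then best
              else max best (pvWalk (PySem.Set.ofList arr) k ((PySem.Set.ofList arr).length + 1) n 0)) 0 := by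
          unfold findLongestArithmeticProgression_alt
          rw [if_neg ha, if_neg hk]
        rw [e2a, pvBLoop (PySem.Set.ofList arr) k ((PySem.Set.ofList arr).length + 1)
          (PySem.Set.ofList arr) 0 (by omega)]
      rw [e1, hloop, e2]
      apply le_antisymm
      · apply pvFoldMax_le _ _ _ _ (pvFoldMax_init_le _ _ 0)
        intro x hx
        exact pvDown_le_B arr k hk' x ((PySem.List.mem_sorted _ _ _ x).mp hx)
      · apply pvFoldMax_le _ _ _ _ (pvFoldMax_init_le _ _ 0)
        intro x hx
        exact pvUpStart_le_A arr k hk' x hx
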